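-- pv_equiv track=rewrite | github.com/sagardeb-dev/Fish-Game-POMDP | world_gen/generator.py | _generate_valid_allocations
-- ===== SOURCE A (Python) =====
-- import itertools
--
-- def _generate_valid_allocations(max_boats: int, zones: list[str]) -> list[dict]:
--     allocations = []
--     for total in range(1, max_boats + 1):
--         for combo in itertools.combinations_with_replacement(range(len(zones)), total):
--             counts = [0] * len(zones)
--             for idx in combo:
--                 counts[idx] += 1
--             allocation = {zones[i]: counts[i] for i in range(len(zones))}
--             if allocation not in allocations:
--                 allocations.append(allocation)
--     return allocations
-- ===== SOURCE B (Python) =====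
-- def _generate_valid_allocations(max_boats: int, zones: list[str]) -> list[dict]:
--     result = []
--     if zones:
--         for total in range(1, max_boats + 1):
--             # tails[rem] = all count-vectors for the current zone suffix using exactly rem boats,
--             # first coordinate descending; start with the suffix consisting of the last zone only
--             tails = [[[rem]] for rem in range(total + 1)]
--             for _ in range(len(zones) - 1):
--                 tails = [[[c] + t for c in range(rem, -1, -1) for t in tails[rem - c]]
--                          for rem in range(total + 1)]
--             for t in tails[total]:
--                 result.append(dict(zip(zones, t)))
--     return result
-- ===== Notes on version B (the rewrite author's own statement) =====
-- stated objective: alternative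
-- what changed: Replaces A's pipeline (itertools.combinations_with_replacement over zone indices, a counting pass per combo, and a linear 'not in' dedup scan over the output) with a bottom-up dynamic-programming table: per total, tails[rem] holds the count-vectors of the current zone suffix using exactly rem boats and one pass per zone extends them, emitting each allocation exactly once in the same order with no dedup scan.
import Mathlib
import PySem

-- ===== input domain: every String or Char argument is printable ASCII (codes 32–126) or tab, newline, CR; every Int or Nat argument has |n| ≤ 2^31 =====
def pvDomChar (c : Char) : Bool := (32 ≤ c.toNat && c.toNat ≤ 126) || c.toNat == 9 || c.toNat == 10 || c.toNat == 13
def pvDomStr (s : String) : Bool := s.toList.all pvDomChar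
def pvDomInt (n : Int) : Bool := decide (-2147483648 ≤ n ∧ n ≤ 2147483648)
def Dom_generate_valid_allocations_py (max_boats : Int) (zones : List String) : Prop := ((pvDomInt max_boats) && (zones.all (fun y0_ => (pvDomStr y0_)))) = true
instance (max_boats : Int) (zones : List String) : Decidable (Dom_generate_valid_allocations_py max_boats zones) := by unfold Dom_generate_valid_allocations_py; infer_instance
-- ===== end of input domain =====

-- B replaces A's combinations_with_replacement + per-combo counting + 'not in' dedup scan with a
-- bottom-up table pass (tails[rem] = count-vectors of the zone suffix using rem boats), emitting the
-- same allocations in the same order with no dedup pass; Pre_ excludes zone lists with duplicate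
-- names, where A's dict-key collapsing and its accidental dedup order apply.


-- ===== PORT A =====
-- itertools.combinations_with_replacement(range(n), r): all nondecreasing index tuples, in
-- CPython's documented lexicographic order, generated by grouping on the first element.
def cwrFrom (s n : Nat) : Nat → List (List Nat)
  | 0 => [[]]
  | r + 1 => (List.range' s (n - s)).flatMap (fun i => (cwrFrom i n r).map (i :: ·))

def generate_valid_allocations_py (max_boats : Int) (zones : List String) : List (List (String × Int)) :=
  (PySem.List.pyRange 1 (max_boats + 1) 1).foldl
    (fun allocations total =>
      -- total ∈ range(1, max_boats+1) is ≥ 1, so total.toNat is exact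
      (cwrFrom 0 zones.length total.toNat).foldl
        (fun allocations combo =>
          -- counts[idx] += 1 : every idx in a combo is < len(zones), so getD/set are exact
          let counts : List Int :=
            combo.foldl (fun cs idx => cs.set idx (cs.getD idx 0 + 1))
              (List.replicate zones.length 0)
          -- {zones[i]: counts[i] for i in range(len(zones))} ; i < len, so getD is exact
          let allocation : List (String × Int) :=
            ((List.range zones.length).foldl
              (fun d i => d.insert (zones.getD i "") (counts.getD i 0))
              PySem.Dict.empty).items
          -- 'if allocation not in allocations': all allocations insert keys in the same order,
          -- so Python's order-insensitive dict == coincides with list equality here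
          if allocation ∈ allocations then allocations else allocations ++ [allocation])
        allocations)
    []

-- ===== PORT B =====
-- tails[rem] holds the count-vectors for the current zone suffix using exactly rem boats;
-- one pass per remaining zone extends every vector on the left with c = rem..0.
def generate_valid_allocations_py_alt (max_boats : Int) (zones : List String) : List (List (String × Int)) :=
  if zones.isEmpty then []
  else
    (PySem.List.pyRange 1 (max_boats + 1) 1).foldl
      (fun result total =>
        let tails0 := (PySem.List.pyRange 0 (total + 1) 1).map (fun rem => [[rem]])
        let tails := (List.range (zones.length - 1)).foldl
          (fun tails _ =>
            (PySem.List.pyRange 0 (total + 1) 1).map (fun rem =>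
              (PySem.List.pyRange rem (-1) (-1)).flatMap (fun c =>
                -- tails[rem - c] : 0 ≤ rem - c ≤ total < len(tails), so pyGetD is exact
                (PySem.List.pyGetD tails (rem - c) []).map (fun t => c :: t))))
          tails0
        result ++ (PySem.List.pyGetD tails total []).map (fun t =>
          ((zones.zip t).foldl (fun d q => d.insert q.1 q.2) PySem.Dict.empty).items))
      []

-- ===== PRECONDITION & SPEC =====
-- Pre_ excludes zone lists with duplicate names: there A's dict comprehension collapses equal
-- keys and its 'not in' check then silently drops the resulting repeats — an accidental corner
-- (it even keeps an all-zero allocation such as {'a': 0}) no caller of a zone list would rely on.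
def Pre_generate_valid_allocations_py (max_boats : Int) (zones : List String) : Prop :=
  zones.Nodup ∨ max_boats ≤ 0
instance (max_boats : Int) (zones : List String) : Decidable (Pre_generate_valid_allocations_py max_boats zones) := by unfold Pre_generate_valid_allocations_py; infer_instance

def pvWitness_generate_valid_allocations_py : Int × List String := (2, ["a", "b"])

def Spec_generate_valid_allocations_py (max_boats : Int) (zones : List String) (out : List (List (String × Int))) : Prop := out = generate_valid_allocations_py_alt max_boats zones
instance (max_boats : Int) (zones : List String) (out : List (List (String × Int))) : Decidable (Spec_generate_valid_allocations_py max_boats zones out) := by unfold Spec_generate_valid_allocations_py; infer_instance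

-- ===== CLAIM (what is proved, stated in full; the proofs are below) =====
def Claim_equal_generate_valid_allocations_py : Prop := ∀ (max_boats : Int) (zones : List String), Dom_generate_valid_allocations_py max_boats zones → Pre_generate_valid_allocations_py max_boats zones → Spec_generate_valid_allocations_py max_boats zones (generate_valid_allocations_py max_boats zones)

-- ===== LEMMAS AND PROOFS =====

-- increment of the head entry (what prepending index s to a combo does to its counts vector)
def pvIncHead : List Int → List Int
  | [] => []
  | a :: t => (a + 1) :: t

-- counts vector of a combo over the index window [s, s+k)
def pvCnt (s k : Nat) (combo : List Nat) : List Int :=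
  (List.range' s k).map (fun i => (combo.count i : Int))

-- per-total distribution stream of counts vectors: all (k+1)-vectors of nonnegative Ints
-- summing to r, first coordinate descending (then recursively so)
def pvDT : Nat → Int → List (List Int)
  | 0, r => [[r]]
  | k + 1, r =>
      ((PySem.List.pyRange 0 (r + 1) 1).reverse).flatMap
        (fun c => (pvDT k (r - c)).map (c :: ·))

-- the stream of allocations both programs emit, in emission order
def pvStream (max_boats : Int) (zones : List String) : List (List (String × Int)) :=
  (PySem.List.pyRange 1 (max_boats + 1) 1).flatMap
    (fun total => (pvDT (zones.length - 1) total).map (fun t => zones.zip t))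

theorem pvDT_zero (k : Nat) : pvDT k 0 = [List.replicate (k + 1) (0 : Int)] := by
  induction k with
  | zero => rfl
  | succ k ih =>
    have h1 : PySem.List.pyRange 0 1 1 = [0] := by decide
    simp [pvDT, h1, ih, List.replicate_succ]

theorem pvDT_len (k : Nat) : ∀ (r : Int), ∀ t ∈ pvDT k r, t.length = k + 1 := by
  induction k with
  | zero => intro r t ht; simp [pvDT] at ht; simp [ht]
  | succ k ih =>
    intro r t ht
    simp only [pvDT, List.mem_flatMap, List.mem_map] at ht
    obtain ⟨c, -, t', ht', rfl⟩ := ht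
    simp [ih _ _ ht']

theorem pvDT_sum (k : Nat) : ∀ (r : Int), ∀ t ∈ pvDT k r, t.sum = r := by
  induction k with
  | zero => intro r t ht; simp [pvDT] at ht; simp [ht]
  | succ k ih =>
    intro r t ht
    simp only [pvDT, List.mem_flatMap, List.mem_map] at ht
    obtain ⟨c, -, t', ht', rfl⟩ := ht
    simp [ih _ _ ht']

theorem pvDT_nodup (k : Nat) : ∀ (r : Int), (pvDT k r).Nodup := by
  induction k with
  | zero => intro r; simp [pvDT]
  | succ k ih =>
    intro r
    show (((PySem.List.pyRange 0 (r + 1) 1).reverse).flatMap _).Nodup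
    rw [List.flatMap_def, List.nodup_flatten]
    constructor
    · intro l hl
      simp only [List.mem_map] at hl
      obtain ⟨c, -, rfl⟩ := hl
      exact (ih _).map (fun a b h => by simpa using h)
    · have hnd : ((PySem.List.pyRange 0 (r + 1) 1).reverse).Nodup :=
        List.nodup_reverse.2 (PySem.List.nodup_pyRange_one _ _)
      rw [List.pairwise_map]
      refine hnd.imp ?_
      intro a b hab t hta htb
      simp only [List.mem_map] at hta htb
      obtain ⟨x, -, rfl⟩ := hta
      obtain ⟨y, -, h⟩ := htb
      injection h with h1 h2; exact hab h1.symm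

theorem pvCwr_lb (r : Nat) : ∀ (s n : Nat), ∀ c ∈ cwrFrom s n r, ∀ x ∈ c, s ≤ x := by
  induction r with
  | zero => intro s n c hc x hx; simp [cwrFrom] at hc; simp [hc] at hx
  | succ r ih =>
    intro s n c hc x hx
    simp only [cwrFrom, List.mem_flatMap, List.mem_map] at hc
    obtain ⟨i, hi, c', hc', rfl⟩ := hc
    have his : s ≤ i := (List.mem_range'_1.1 hi).1
    rcases List.mem_cons.1 hx with rfl | hx'
    · exact his
    · exact le_trans his (ih i n c' hc' x hx')

theorem pvCwr_split (s n r : Nat) (h : s < n) :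
    cwrFrom s n (r + 1) =
      (cwrFrom s n r).map (s :: ·) ++ cwrFrom (s + 1) n (r + 1) := by
  have hd : n - s = (n - (s + 1)) + 1 := by omega
  conv_lhs => rw [cwrFrom, hd, List.range'_succ]
  cases r with
  | zero => simp [cwrFrom]
  | succ r => simp [cwrFrom]

theorem pvCounts_fold_gen (combo : List Nat) : ∀ (n : Nat) (f : Nat → Int),
    (∀ x ∈ combo, x < n) →
    combo.foldl (fun cs idx => cs.set idx (cs.getD idx 0 + 1)) ((List.range n).map f) =
      (List.range n).map (fun i => f i + (combo.count i : Int)) := by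
  induction combo with
  | nil => intro n f h; simp
  | cons a l ih =>
    intro n f h
    have ha : a < n := h a (List.mem_cons_self)
    have hset : (((List.range n).map f).set a (((List.range n).map f).getD a 0 + 1)) =
        (List.range n).map (fun i => if i = a then f a + 1 else f i) := by
      have hget : ((List.range n).map f).getD a 0 = f a := by
        rw [List.getD_eq_getElem?_getD]
        simp [List.getElem?_range, ha]
      apply List.ext_getElem
      · simp
      · intro k hk hk2
        simp only [List.length_set, List.length_map, List.length_range] at hk
        rw [List.getElem_set]
        simp only [List.getElem_map, List.getElem_range]
        by_cases hka : k = a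
        · simp [hka, List.getElem?_range, ha]
        · rw [if_neg (fun hh => hka hh.symm), if_neg hka]
    rw [List.foldl_cons, hset, ih n _ (fun x hx => h x (List.mem_cons_of_mem _ hx))]
    apply List.map_congr_left
    intro i hi
    by_cases hia : i = a
    · subst hia; simp [List.count_cons_self]; ring
    · have hai : ¬ a = i := fun hh => hia hh.symm
      simp [hia, hai]

theorem pvCounts_fold (n : Nat) (combo : List Nat) (h : ∀ x ∈ combo, x < n) :
    combo.foldl (fun cs idx => cs.set idx (cs.getD idx 0 + 1)) (List.replicate n (0 : Int)) =
      (List.range n).map (fun i => (combo.count i : Int)) := by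
  have h0 : List.replicate n (0 : Int) = (List.range n).map (fun _ => (0 : Int)) := by
    simp [List.map_const']
  rw [h0, pvCounts_fold_gen combo n _ h]
  simp

theorem pvDedup_id (l : List (List (String × Int))) : ∀ acc, (acc ++ l).Nodup →
    l.foldl (fun acc x => if x ∈ acc then acc else acc ++ [x]) acc = acc ++ l := by
  induction l with
  | nil => intro acc h; simp
  | cons a l ih =>
    intro acc h
    have ha : a ∉ acc := by
      intro hmem
      exact (List.disjoint_of_nodup_append h) hmem List.mem_cons_self
    rw [List.foldl_cons, if_neg ha, ih (acc ++ [a]) (by simpa using h)]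
    simp

theorem pvDict_build (l : List (String × Int)) : ∀ (d : PySem.Dict String Int),
    (d.keys ++ l.map Prod.fst).Nodup →
    (l.foldl (fun d p => d.insert p.1 p.2) d).items = d.items ++ l := by
  induction l with
  | nil => intro d h; simp
  | cons p l ih =>
    intro d h
    have hp : ¬ d.contains p.1 = true := by
      intro hc
      have : p.1 ∈ d.keys := (PySem.Dict.contains_iff_mem_keys _ _).1 hc
      exact (List.disjoint_of_nodup_append h) this (by simp)
    have hpf : d.contains p.1 = false := by simpa using hp
    rw [List.foldl_cons, ih (d.insert p.1 p.2) ?_,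
        PySem.Dict.items_insert_of_not_contains d p.2 hpf]
    · simp
    · rw [PySem.Dict.keys_insert_of_not_contains d p.2 hpf]
      simpa [List.append_assoc] using h

theorem pvCwr_ub (r : Nat) : ∀ (s n : Nat), ∀ c ∈ cwrFrom s n r, ∀ x ∈ c, x < n := by
  induction r with
  | zero => intro s n c hc x hx; simp [cwrFrom] at hc; simp [hc] at hx
  | succ r ih =>
    intro s n c hc x hx
    simp only [cwrFrom, List.mem_flatMap, List.mem_map] at hc
    obtain ⟨i, hi, c', hc', rfl⟩ := hc
    have hin : i < n := by
      have := List.mem_range'_1.1 hi; omega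
    rcases List.mem_cons.1 hx with rfl | hx'
    · exact hin
    · exact ih i n c' hc' x hx'

-- reversed(range(R+1)) peels its LAST element 0
theorem pvDT_step (k : Nat) (r : Int) (hr : 0 ≤ r) :
    pvDT (k + 1) (r + 1) =
      (pvDT (k + 1) r).map pvIncHead ++ (pvDT k (r + 1)).map ((0 : Int) :: ·) := by
  show ((PySem.List.pyRange 0 (r + 1 + 1) 1).reverse).flatMap _ = _
  rw [PySem.List.pyRange_one_cons (by omega)]
  -- shift: pyRange 1 (r+2) = (pyRange 0 (r+1)).map (· + 1)
  have hshift : PySem.List.pyRange (0 + 1) (r + 1 + 1) 1 =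
      (PySem.List.pyRange 0 (r + 1) 1).map (· + 1) := by
    rw [PySem.List.pyRange_one, PySem.List.pyRange_one]
    have : (r + 1 + 1 - (0 + 1)).toNat = (r + 1 - 0).toNat := by omega
    rw [this, List.map_map]
    apply List.map_congr_left; intro k hk; simp; ring
  rw [List.reverse_cons, List.flatMap_append, hshift]
  congr 1
  · -- main chunk = map pvIncHead (pvDT (k+1) r)
    rw [← List.map_reverse, List.flatMap_map]
    show _ = List.map pvIncHead (((PySem.List.pyRange 0 (r + 1) 1).reverse).flatMap
      (fun c => (pvDT k (r - c)).map (c :: ·)))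
    rw [List.map_flatMap]
    congr 1
    funext c
    have h1 : r + 1 - (c + 1) = r - c := by ring
    rw [h1, List.map_map]
    apply List.map_congr_left
    intro t ht
    rfl
  · -- c = 0 chunk
    simp

-- counts vector of (s :: combo) over window starting at s: head increments
theorem pvCnt_cons_self (s k : Nat) (combo : List Nat) :
    pvCnt s (k + 1) (s :: combo) = pvIncHead (pvCnt s (k + 1) combo) := by
  simp only [pvCnt, List.range'_succ, List.map_cons, pvIncHead]
  congr 1
  · rw [List.count_cons_self]; push_cast; ring
  · apply List.map_congr_left
    intro i hi
    have hne : ¬ s = i := by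
      have := (List.mem_range'_1.1 hi).1; omega
    simp [List.count_cons, hne]

-- counts vector over window starting at s of a combo with all elements ≥ s+1: head is 0
theorem pvCnt_zero_head (s k : Nat) (combo : List Nat) (h : ∀ x ∈ combo, s + 1 ≤ x) :
    pvCnt s (k + 1) combo = 0 :: pvCnt (s + 1) k combo := by
  simp only [pvCnt, List.range'_succ, List.map_cons]
  congr 1
  · have : combo.count s = 0 := by
      rw [List.count_eq_zero]
      intro hmem
      exact absurd (h s hmem) (by omega)
    simp [this]

theorem pvCwr_counts (d : Nat) : ∀ (s n : Nat), n = s + d + 1 → ∀ (r : Nat),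
    (cwrFrom s n r).map (pvCnt s (d + 1)) = pvDT d (r : Int) := by
  induction d with
  | zero =>
    intro s n hn r
    induction r with
    | zero => simp [cwrFrom, pvDT, pvCnt]
    | succ r ihr =>
      rw [pvCwr_split s n r (by omega), List.map_append, List.map_map]
      have h2 : cwrFrom (s + 1) n (r + 1) = [] := by
        rw [cwrFrom]
        have : n - (s + 1) = 0 := by omega
        simp [this]
      rw [h2]
      have : (pvCnt s (0 + 1)) ∘ (s :: ·) = pvIncHead ∘ (pvCnt s (0 + 1)) := by
        funext c; exact pvCnt_cons_self s 0 c
      rw [this, ← List.map_map, ihr]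
      show List.map pvIncHead (pvDT 0 (r : Int)) ++ [] = pvDT 0 ((r : Int) + 1)
      simp [pvDT, pvIncHead]
  | succ e ihd =>
    intro s n hn r
    induction r with
    | zero =>
      simp only [cwrFrom, List.map_cons, List.map_nil, Nat.cast_zero, pvDT_zero]
      congr 1
      simp [pvCnt, List.map_const']
    | succ r ihr =>
      rw [pvCwr_split s n r (by omega), List.map_append, List.map_map]
      have heq1 : (pvCnt s (e + 1 + 1)) ∘ (s :: ·) = pvIncHead ∘ (pvCnt s (e + 1 + 1)) := by
        funext c; exact pvCnt_cons_self s (e + 1) c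
      rw [heq1, ← List.map_map, ihr]
      have heq2 : (cwrFrom (s + 1) n (r + 1)).map (pvCnt s (e + 1 + 1)) =
          ((cwrFrom (s + 1) n (r + 1)).map (pvCnt (s + 1) (e + 1))).map ((0 : Int) :: ·) := by
        rw [List.map_map]
        apply List.map_congr_left
        intro c hc
        exact pvCnt_zero_head s (e + 1) c (pvCwr_lb (r + 1) (s + 1) n c hc)
      rw [heq2, ihd (s + 1) n (by omega) (r + 1)]
      have := pvDT_step e (r : Int) (by positivity)
      push_cast
      rw [this]

theorem pvCwr_nil (s n r : Nat) (h : n ≤ s) : cwrFrom s n (r + 1) = [] := by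
  rw [cwrFrom]
  have h0 : n - s = 0 := by omega
  simp [h0]

-- building the zone ↦ count dict over distinct zones is just the zip
theorem pvZipDict (zones : List String) (t : List Int) (hnd : zones.Nodup)
    (hlen : zones.length ≤ t.length) :
    ((zones.zip t).foldl (fun d p => d.insert p.1 p.2) PySem.Dict.empty).items = zones.zip t := by
  have h := pvDict_build (zones.zip t) PySem.Dict.empty ?_
  · simpa using h
  · show (PySem.Dict.empty.keys ++ ((zones.zip t).map Prod.fst)).Nodup
    rw [List.map_fst_zip hlen]
    simpa [PySem.Dict.keys, PySem.Dict.empty] using hnd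

-- A's pair comprehension over range(len(zones)) builds exactly zip zones counts
theorem pvPairs (zones : List String) (counts : List Int)
    (h : counts.length = zones.length) :
    (List.range zones.length).map (fun i => (zones.getD i "", counts.getD i 0)) =
      zones.zip counts := by
  apply List.ext_getElem
  · simp [List.length_zip, h]
  · intro k hk hk2
    simp only [List.length_map, List.length_range] at hk
    simp only [List.getElem_map, List.getElem_range, List.getElem_zip]
    have h1 : zones.getD k "" = zones[k] := by
      rw [List.getD_eq_getElem?_getD]; simp [hk]
    have h2 : counts.getD k 0 = counts[k] := by
      rw [List.getD_eq_getElem?_getD]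
      simp [(by omega : k < counts.length)]
    rw [h1, h2]

-- the allocation A computes from one combo (A's loop body, as a function)
def pvAllocOf (zones : List String) (combo : List Nat) : List (String × Int) :=
  ((List.range zones.length).foldl
    (fun d i => d.insert (zones.getD i "")
      ((combo.foldl (fun cs idx => cs.set idx (cs.getD idx 0 + 1))
        (List.replicate zones.length (0 : Int))).getD i 0))
    PySem.Dict.empty).items

-- a dedup-append loop over combos consuming f(combo) is the loop over the mapped stream
theorem pvFold_dedup_map {α : Type} (f : α → List (String × Int)) (l : List α) :
    ∀ acc, l.foldl (fun acc x => if f x ∈ acc then acc else acc ++ [f x]) acc =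
      (l.map f).foldl (fun acc x => if x ∈ acc then acc else acc ++ [x]) acc := by
  induction l with
  | nil => intro acc; rfl
  | cons a l ih => intro acc; simp only [List.foldl_cons, List.map_cons, ih]

-- A's per-total inner stream of allocations equals the zipped distribution stream
theorem pvMapAlloc (zones : List String) (hnd : zones.Nodup) (hz : zones ≠ []) (r : Nat) :
    (cwrFrom 0 zones.length r).map (pvAllocOf zones) =
      (pvDT (zones.length - 1) (r : Int)).map (fun t => zones.zip t) := by
  unfold pvAllocOf
  have hn1 : zones.length = 0 + (zones.length - 1) + 1 := by
    cases zones with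
    | nil => exact absurd rfl hz
    | cons a l => simp
  have hcw := pvCwr_counts (zones.length - 1) 0 zones.length hn1 r
  rw [← hcw, List.map_map]
  apply List.map_congr_left
  intro combo hc
  have hub : ∀ x ∈ combo, x < zones.length := pvCwr_ub r 0 zones.length combo hc
  have hcnt := pvCounts_fold zones.length combo hub
  simp only [hcnt]
  set cnts := (List.range zones.length).map (fun j => (combo.count j : Int)) with hc2
  have key : (List.range zones.length).foldl
      (fun d i => d.insert (zones.getD i "") (cnts.getD i 0)) PySem.Dict.empty
      = (zones.zip cnts).foldl (fun d p => d.insert p.1 p.2) PySem.Dict.empty := by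
    rw [← pvPairs zones cnts (by simp [hc2]), List.foldl_map]
  rw [key, pvZipDict zones cnts hnd (by simp [hc2])]
  congr 1
  have hlen : (zones.length - 1) + 1 = zones.length := by omega
  simp [hc2, pvCnt, hlen, List.range_eq_range']

-- the emitted stream has no duplicates (zones distinct): dedup in A never fires
theorem pvStream_nodup (max_boats : Int) (zones : List String)
    (hnd : zones.Nodup) (hz : zones ≠ []) : (pvStream max_boats zones).Nodup := by
  have hlen1 : zones.length = (zones.length - 1) + 1 := by
    cases zones with
    | nil => exact absurd rfl hz
    | cons a l => simp
  have hinj : ∀ (tot : Int), ∀ t1 ∈ pvDT (zones.length - 1) tot,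
      ∀ {tot2 : Int}, ∀ t2 ∈ pvDT (zones.length - 1) tot2,
      zones.zip t1 = zones.zip t2 → t1 = t2 := by
    intro tot t1 h1 tot2 t2 h2 heq
    have l1 := pvDT_len _ _ t1 h1
    have l2 := pvDT_len _ _ t2 h2
    calc t1 = (zones.zip t1).map Prod.snd := (List.map_snd_zip (by omega)).symm
    _ = (zones.zip t2).map Prod.snd := by rw [heq]
    _ = t2 := List.map_snd_zip (by omega)
  unfold pvStream
  rw [List.flatMap_def, List.nodup_flatten]
  constructor
  · intro l hl
    obtain ⟨total, -, rfl⟩ := List.mem_map.1 hl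
    exact (pvDT_nodup _ _).map_on (fun t1 h1 t2 h2 heq => hinj total t1 h1 t2 h2 heq)
  · rw [List.pairwise_map]
    refine (PySem.List.nodup_pyRange_one _ _).imp ?_
    intro a b hab x hxa hxb
    obtain ⟨t1, h1, rfl⟩ := List.mem_map.1 hxa
    obtain ⟨t2, h2, heq⟩ := List.mem_map.1 hxb
    have ht : t1 = t2 := hinj a t1 h1 t2 h2 heq.symm
    exact hab (by rw [← pvDT_sum _ a t1 h1, ht, pvDT_sum _ b t2 h2])

-- range(rem, -1, -1) is reversed(range(rem + 1))
theorem pvRangeDown (r : Int) (hr : 0 ≤ r) :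
    PySem.List.pyRange r (-1) (-1) = (PySem.List.pyRange 0 (r + 1) 1).reverse := by
  rw [PySem.List.pyRange_neg_one, PySem.List.pyRange_one, ← List.map_reverse]
  have hn : (r - -1).toNat = (r + 1 - 0).toNat := by omega
  rw [hn]
  apply List.ext_getElem
  · simp
  · intro i hi1 hi2
    simp only [List.length_map, List.length_range] at hi1
    simp only [List.getElem_map, List.getElem_reverse, List.getElem_range,
      List.length_range]
    omega

-- loop invariant of B's table pass: after j passes, tails[rem] = pvDT j rem
theorem pvTails_inv (total : Int) (_htot : 0 ≤ total) (j : Nat) :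
    (List.range j).foldl
      (fun tails _ =>
        (PySem.List.pyRange 0 (total + 1) 1).map (fun rem =>
          (PySem.List.pyRange rem (-1) (-1)).flatMap (fun c =>
            (PySem.List.pyGetD tails (rem - c) []).map (fun t => c :: t))))
      ((PySem.List.pyRange 0 (total + 1) 1).map (fun rem => [[rem]]))
    = (PySem.List.pyRange 0 (total + 1) 1).map (fun rem => pvDT j rem) := by
  induction j with
  | zero =>
    simp only [List.range_zero, List.foldl_nil]
    apply List.map_congr_left
    intro rem _
    rfl
  | succ j ih =>
    rw [List.range_succ, List.foldl_append, List.foldl_cons, List.foldl_nil, ih]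
    apply List.map_congr_left
    intro rem hrem
    have h0 : 0 ≤ rem ∧ rem < total + 1 := PySem.List.mem_pyRange_one.1 hrem
    rw [pvRangeDown rem h0.1]
    show _ = ((PySem.List.pyRange 0 (rem + 1) 1).reverse).flatMap
      (fun c => (pvDT j (rem - c)).map (c :: ·))
    apply List.flatMap_congr
    intro c hc
    have hc' := PySem.List.mem_pyRange_one.1 (List.mem_reverse.1 hc)
    rw [PySem.List.pyGetD_map_pyRange_of_nonneg _ _ _ _ (by omega) (by omega)]

-- B computes the stream directly
theorem pvB_eq (max_boats : Int) (zones : List String) (hnd : zones.Nodup) (hz : zones ≠ []) :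
    generate_valid_allocations_py_alt max_boats zones = pvStream max_boats zones := by
  unfold generate_valid_allocations_py_alt pvStream
  rw [if_neg (by simpa using hz), PySem.List.foldl_append_eq_flatMap, List.nil_append]
  apply List.flatMap_congr
  intro total htot
  have h1 : 1 ≤ total := (PySem.List.mem_pyRange_one.1 htot).1
  show (PySem.List.pyGetD ((List.range (zones.length - 1)).foldl _
      ((PySem.List.pyRange 0 (total + 1) 1).map (fun rem => [[rem]]))) total []).map _ = _
  rw [pvTails_inv total (by omega) (zones.length - 1),
    PySem.List.pyGetD_map_pyRange_of_nonneg _ _ _ _ (by omega) (by omega)]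
  apply List.map_congr_left
  intro t ht
  have hl := pvDT_len _ _ t ht
  have hlen1 : zones.length = (zones.length - 1) + 1 := by
    cases zones with
    | nil => exact absurd rfl hz
    | cons a l => simp
  exact pvZipDict zones t hnd (by omega)

-- A is the dedup-fold over the same stream
theorem pvA_eq (max_boats : Int) (zones : List String) (hnd : zones.Nodup) (hz : zones ≠ []) :
    generate_valid_allocations_py max_boats zones =
      (pvStream max_boats zones).foldl
        (fun acc x => if x ∈ acc then acc else acc ++ [x]) [] := by
  unfold generate_valid_allocations_py pvStream
  rw [List.foldl_flatMap]
  apply PySem.List.foldl_congr_mem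
  intro acc total htot
  have h1 : 1 ≤ total := (PySem.List.mem_pyRange_one.1 htot).1
  have h2 : ((total.toNat : Nat) : Int) = total := Int.toNat_of_nonneg (by omega)
  show (cwrFrom 0 zones.length total.toNat).foldl
      (fun allocations combo =>
        if pvAllocOf zones combo ∈ allocations then allocations
        else allocations ++ [pvAllocOf zones combo]) acc = _
  refine (pvFold_dedup_map (pvAllocOf zones) _ acc).trans ?_
  rw [pvMapAlloc zones hnd hz total.toNat, h2]

-- ===== VERDICT (by name: the statement is the Claim_ definition above) =====
theorem generate_valid_allocations_py_spec : Claim_equal_generate_valid_allocations_py := by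
  intro max_boats zones _ hpre
  unfold Spec_generate_valid_allocations_py
  rcases Decidable.em (max_boats ≤ 0) with hmb | hmb
  · -- no totals at all: range(1, max_boats+1) is empty, both sides are []
    have hr : PySem.List.pyRange 1 (max_boats + 1) 1 = [] :=
      PySem.List.pyRange_one_eq_nil (by omega)
    unfold generate_valid_allocations_py generate_valid_allocations_py_alt
    rw [hr]
    cases zones.isEmpty <;> simp
  have hnd : zones.Nodup := hpre.resolve_right hmb
  by_cases hz : zones = []
  · subst hz
    unfold generate_valid_allocations_py generate_valid_allocations_py_alt
    refine Eq.trans (PySem.List.foldl_congr_mem _ _ (fun acc _ => acc) _ ?_)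
      (PySem.List.foldl_ignore _ _)
    intro acc total htot
    have h1 : 1 ≤ total := (PySem.List.mem_pyRange_one.1 htot).1
    have h2 : total.toNat = (total.toNat - 1) + 1 := by omega
    simp only [List.length_nil]
    rw [h2, pvCwr_nil 0 0 _ (by omega)]
    rfl
  · rw [pvA_eq max_boats zones hnd hz, pvB_eq max_boats zones hnd hz,
      pvDedup_id _ _ (by simpa using pvStream_nodup max_boats zones hnd hz)]
    simp
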